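-- pv_equiv track=rewrite | github.com/oyeprashar/Data-structures-and-algorithms | Dynamic Programming/Number of unique BT that can be form from N nodes (catalan number and factorial).py | numOfBT
-- ===== SOURCE A (Python) =====
-- def getFactorial(num,DP):
-- 	if num == 0 or num == 1:
-- 		return 1
--
-- 	if DP[num] != -1:
-- 		return DP[num]
--
-- 	DP[num] = num * getFactorial(num-1,DP)
--
-- 	return DP[num]
--
-- def factorial(num):
-- 	DP = [-1] * (num+1)
-- 	DP[0] = 1
-- 	DP[1] = 1
-- 	return getFactorial(num,DP)
--
-- def numOfBT(N):
--
-- 	memory = [0] * (N + 1)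
-- 	memory[0] = 1
-- 	memory[1] = 1
--
-- 	for x in range(2,N+1):
-- 		ans = 0
-- 		for i in range(1,x+1):
-- 			ans += memory[i-1]*memory[x-i]*factorial(x)
--
-- 		memory[x] = ans
--
-- 	return memory[N]
-- ===== SOURCE B (Python) =====
-- def numOfBT(N):
--     memory = [1, 1]
--     fact = 1
--     for x in range(2, N + 1):
--         fact *= x
--         h = x // 2
--         total = 0
--         for i in range(h):
--             total += memory[i] * memory[x - 1 - i]
--         total += total
--         if x % 2 == 1:
--             total += memory[h] * memory[h]
--         memory.append(fact * total)
--     return memory[N]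
-- ===== Notes on version B (the rewrite author's own statement) =====
-- stated objective: faster
-- what changed: B replaces A's per-term call to a DP-array recursive factorial (rebuilt from scratch inside the inner loop, making A cubic) with a single running factorial accumulator hoisted out of the convolution loop, and halves the convolution work using its symmetry (sum the first half, double it, add the middle term for odd x).
import Mathlib
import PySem

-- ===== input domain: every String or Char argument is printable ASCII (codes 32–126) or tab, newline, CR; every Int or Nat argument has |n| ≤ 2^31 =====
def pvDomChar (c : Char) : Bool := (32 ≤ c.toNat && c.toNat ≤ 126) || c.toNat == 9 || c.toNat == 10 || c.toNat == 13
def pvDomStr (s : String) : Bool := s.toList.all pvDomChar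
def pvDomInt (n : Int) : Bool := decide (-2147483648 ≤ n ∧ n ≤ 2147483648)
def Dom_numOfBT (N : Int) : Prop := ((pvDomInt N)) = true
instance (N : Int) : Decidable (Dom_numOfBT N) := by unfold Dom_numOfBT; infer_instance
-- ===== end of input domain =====

-- B hoists the factorial out of the inner loop as a running product (A recomputes a
-- memoised recursive factorial from scratch for every addend): one quadratic pass.

-- ===== PORT A =====
-- getFactorial(num, DP): memoised recursive factorial; DP is threaded through (Python mutates it in place).
-- The 'num < 2' guard only makes the recursion total; after the base cases Python only reaches the else with num ≥ 2.
def getFactorial (num : Int) (DP : List Int) : Int × List Int :=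
  if num = 0 ∨ num = 1 then (1, DP)
  else if num < 2 then (1, DP)
  else if PySem.List.pyGetD DP num 0 ≠ -1 then (PySem.List.pyGetD DP num 0, DP)
  else
    let p := getFactorial (num - 1) DP
    let DP2 := PySem.List.pySetD p.2 num (num * p.1)
    (PySem.List.pyGetD DP2 num 0, DP2)
  termination_by num.toNat
  decreasing_by omega

def factorial (num : Int) : Int :=
  let DP := List.replicate (num + 1).toNat (-1)
  let DP := PySem.List.pySetD DP 0 1
  let DP := PySem.List.pySetD DP 1 1
  (getFactorial num DP).1

def numOfBT (N : Int) : Int :=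
  let memory := List.replicate (N + 1).toNat 0
  let memory := PySem.List.pySetD memory 0 1
  let memory := PySem.List.pySetD memory 1 1
  let memory := (PySem.List.pyRange 2 (N + 1) 1).foldl (fun mem x =>
    let ans := (PySem.List.pyRange 1 (x + 1) 1).foldl (fun ans i =>
      ans + PySem.List.pyGetD mem (i - 1) 0 * PySem.List.pyGetD mem (x - i) 0 * factorial x) 0
    PySem.List.pySetD mem x ans) memory
  PySem.List.pyGetD memory N 0

-- ===== PORT B =====
def numOfBT_alt (N : Int) : Int :=
  let st := (PySem.List.pyRange 2 (N + 1) 1).foldl (fun (st : List Int × Int) x =>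
    let fact := st.2 * x
    let h := PySem.Int.floordiv x 2
    let total := (PySem.List.pyRange 0 h 1).foldl (fun t i =>
      t + PySem.List.pyGetD st.1 i 0 * PySem.List.pyGetD st.1 (x - 1 - i) 0) 0
    let total := total + total
    let total := if PySem.Int.mod x 2 = 1 then
        total + PySem.List.pyGetD st.1 h 0 * PySem.List.pyGetD st.1 h 0
      else total
    (st.1 ++ [fact * total], fact)) ([1, 1], 1)
  PySem.List.pyGetD st.1 N 0

-- ===== PRECONDITION & SPEC =====
-- A raises IndexError for every N ≤ 0 (memory[1] on a list of length ≤ 1), so those inputs are excluded.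
def Pre_numOfBT (N : Int) : Prop := 1 ≤ N
instance (N : Int) : Decidable (Pre_numOfBT N) := by unfold Pre_numOfBT; infer_instance
def pvWitness_numOfBT : Int := 3

def Spec_numOfBT (N : Int) (out : Int) : Prop := out = numOfBT_alt N
instance (N : Int) (out : Int) : Decidable (Spec_numOfBT N out) := by unfold Spec_numOfBT; infer_instance

-- ===== CLAIM (what is proved, stated in full; the proofs are below) =====
def Claim_equal_numOfBT : Prop := ∀ (N : Int), Dom_numOfBT N → Pre_numOfBT N → Spec_numOfBT N (numOfBT N)

-- ===== LEMMAS AND PROOFS =====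

-- Proof-side names for the loop bodies of the two ports (definitionally equal to the inline lambdas).
def innerA (mem : List Int) (x : Int) : Int :=
  (PySem.List.pyRange 1 (x + 1) 1).foldl (fun ans i =>
    ans + PySem.List.pyGetD mem (i - 1) 0 * PySem.List.pyGetD mem (x - i) 0 * factorial x) 0

def stepA (mem : List Int) (x : Int) : List Int :=
  PySem.List.pySetD mem x (innerA mem x)

def innerB (mem : List Int) (x : Int) : Int :=
  let h := PySem.Int.floordiv x 2
  let total := (PySem.List.pyRange 0 h 1).foldl (fun t i =>
    t + PySem.List.pyGetD mem i 0 * PySem.List.pyGetD mem (x - 1 - i) 0) 0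
  let total := total + total
  if PySem.Int.mod x 2 = 1 then total + PySem.List.pyGetD mem h 0 * PySem.List.pyGetD mem h 0
  else total

def stepB (st : List Int × Int) (x : Int) : List Int × Int :=
  (st.1 ++ [st.2 * x * innerB st.1 x], st.2 * x)

theorem numOfBT_eq (N : Int) : numOfBT N =
    PySem.List.pyGetD ((PySem.List.pyRange 2 (N + 1) 1).foldl stepA
      (PySem.List.pySetD (PySem.List.pySetD (List.replicate (N + 1).toNat 0) 0 1) 1 1)) N 0 := rfl

theorem numOfBT_alt_eq (N : Int) : numOfBT_alt N =
    PySem.List.pyGetD ((PySem.List.pyRange 2 (N + 1) 1).foldl stepB ([1, 1], 1)).1 N 0 := rfl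

theorem pyGetD_append_left_nat (xs ys : List Int) (j : Nat) (h : j < xs.length) :
    PySem.List.pyGetD (xs ++ ys) (j : Int) 0 = PySem.List.pyGetD xs (j : Int) 0 := by
  simp [PySem.List.pyGetD_natCast, List.getD_eq_getElem?_getD, List.getElem?_append_left h]

-- getFactorial on a DP that is -1 at every index 2..n computes n! (and keeps the length).
theorem getFactorial_eq (n : Nat) : ∀ DP : List Int,
    (∀ j : Nat, 2 ≤ j → j ≤ n → PySem.List.pyGetD DP (j : Int) 0 = -1) →
    n < DP.length →
    (getFactorial (n : Int) DP).1 = (n.factorial : Int) ∧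
      (getFactorial (n : Int) DP).2.length = DP.length := by
  induction n with
  | zero => intro DP _ _; rw [getFactorial]; norm_num [Nat.factorial]
  | succ m ih =>
    intro DP hmemo hlen
    by_cases hm : m = 0
    · subst hm; rw [getFactorial]; norm_num [Nat.factorial]
    · have c1 : ¬(((m + 1 : Nat) : Int) = 0 ∨ ((m + 1 : Nat) : Int) = 1) := by push_cast; omega
      have c2 : ¬(((m + 1 : Nat) : Int) < 2) := by push_cast; omega
      have c3 : PySem.List.pyGetD DP ((m + 1 : Nat) : Int) 0 = -1 := hmemo (m + 1) (by omega) le_rfl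
      have harg : ((m + 1 : Nat) : Int) - 1 = (m : Int) := by push_cast; ring
      rw [getFactorial, if_neg c1, if_neg c2, if_neg (not_not_intro c3)]
      simp only [harg]
      obtain ⟨ih1, ih2⟩ := ih DP (fun j h2 hj => hmemo j h2 (by omega)) (by omega)
      have hlt : m + 1 < (getFactorial (m : Int) DP).2.length := by omega
      constructor
      · rw [PySem.List.pyGetD_pySetD_natCast _ (m + 1) (m + 1) _ _ hlt, if_pos rfl, ih1,
          Nat.factorial_succ]
        push_cast; ring
      · rw [PySem.List.length_pySetD, ih2]

-- factorial x = x! for x ≥ 2 (the only arguments A passes to it).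
theorem factorial_eq (x : Nat) (hx : 2 ≤ x) : factorial (x : Int) = (x.factorial : Int) := by
  have ht : ((x : Int) + 1).toNat = x + 1 := by omega
  have h0 : PySem.List.pySetD (List.replicate (x + 1) (-1 : Int)) 0 1
      = (List.replicate (x + 1) (-1 : Int)).set 0 1 := by
    rw [PySem.List.pySetD_of_nonneg _ _ (by norm_num)]; norm_num
  have h1 : PySem.List.pySetD ((List.replicate (x + 1) (-1 : Int)).set 0 1) 1 1
      = ((List.replicate (x + 1) (-1 : Int)).set 0 1).set 1 1 := by
    rw [PySem.List.pySetD_of_nonneg _ _ (by norm_num)]; norm_num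
  show (getFactorial (x : Int) _).1 = _
  rw [ht, h0, h1]
  refine (getFactorial_eq x _ ?_ (by simp)).1
  intro j h2 hj
  have hjlen : j < (((List.replicate (x + 1) (-1 : Int)).set 0 1).set 1 1).length := by
    simp; omega
  rw [PySem.List.pyGetD_natCast, List.getD_eq_getElem?_getD, List.getElem?_eq_getElem hjlen]
  simp only [List.getElem_set, List.getElem_replicate, Option.getD_some]
  rw [if_neg (by omega), if_neg (by omega)]

-- a foldl-accumulated sum over range is a Finset sum
theorem foldl_add_sum (f : Nat → Int) (m : Nat) : ∀ c : Int,
    List.foldl (fun (a : Int) (j : Nat) => a + f j) c (List.range m)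
      = c + ∑ j ∈ Finset.range m, f j := by
  induction m with
  | zero => intro c; simp
  | succ m ih =>
    intro c
    rw [List.range_succ]
    simp only [List.foldl_append, List.foldl_cons, List.foldl_nil, ih, Finset.sum_range_succ]
    ring

-- a symmetric sum over range (k+1) equals twice its first half plus the middle term (if any)
theorem sym_sum (g : Nat → Int) (k : Nat) (hsym : ∀ j, j ≤ k → g j = g (k - j)) :
    ∑ j ∈ Finset.range (k + 1), g j
      = (∑ j ∈ Finset.range ((k + 1) / 2), g j) + (∑ j ∈ Finset.range ((k + 1) / 2), g j)
        + (if (k + 1) % 2 = 1 then g ((k + 1) / 2) else 0) := by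
  set h := (k + 1) / 2 with hh
  have hsplit : ∑ j ∈ Finset.range (k + 1), g j
      = ∑ j ∈ Finset.range h, g j + ∑ j ∈ Finset.Ico h (k + 1), g j := by
    rw [Finset.range_eq_Ico, ← Finset.sum_Ico_consecutive g (Nat.zero_le h) (by omega)]
  have hIco : ∑ j ∈ Finset.Ico h (k + 1), g j = ∑ j ∈ Finset.range (k + 1 - h), g (h + j) :=
    Finset.sum_Ico_eq_sum_range g h (k + 1)
  have hrefl : ∑ j ∈ Finset.range (k + 1 - h), g (h + j)
      = ∑ j ∈ Finset.range (k + 1 - h), g j := by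
    calc ∑ j ∈ Finset.range (k + 1 - h), g (h + j)
        = ∑ j ∈ Finset.range (k + 1 - h), g (h + (k + 1 - h - 1 - j)) :=
          (Finset.sum_range_reflect (fun i => g (h + i)) (k + 1 - h)).symm
      _ = ∑ j ∈ Finset.range (k + 1 - h), g j := by
          refine Finset.sum_congr rfl ?_
          intro j hj
          have hj' : j < k + 1 - h := Finset.mem_range.mp hj
          have e : h + (k + 1 - h - 1 - j) = k - j := by omega
          rw [e, ← hsym j (by omega)]
  by_cases hodd : (k + 1) % 2 = 1
  · have hm : k + 1 - h = h + 1 := by omega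
    rw [hsplit, hIco, hrefl, hm, Finset.sum_range_succ, if_pos hodd]; ring
  · have hm : k + 1 - h = h := by omega
    rw [hsplit, hIco, hrefl, hm, if_neg hodd]; ring

-- B's halved inner loop computes the full convolution sum
theorem innerB_eq (memB : List Int) (k : Nat) :
    innerB memB ((k : Int) + 1)
      = ∑ j ∈ Finset.range (k + 1),
          PySem.List.pyGetD memB ((j : Nat) : Int) 0 *
            PySem.List.pyGetD memB ((k : Int) - ((j : Nat) : Int)) 0 := by
  have hsym : ∀ j, j ≤ k →
      PySem.List.pyGetD memB ((j : Nat) : Int) 0 *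
          PySem.List.pyGetD memB ((k : Int) - ((j : Nat) : Int)) 0
        = PySem.List.pyGetD memB (((k - j : Nat) : Nat) : Int) 0 *
          PySem.List.pyGetD memB ((k : Int) - (((k - j : Nat) : Nat) : Int)) 0 := by
    intro j hj
    have e1 : (((k - j : Nat) : Nat) : Int) = (k : Int) - (j : Int) := by omega
    have e2 : (k : Int) - (((k - j : Nat) : Nat) : Int) = (j : Int) := by omega
    rw [e2, e1, mul_comm]
  unfold innerB
  have hh : PySem.Int.floordiv ((k : Int) + 1) 2 = (((k + 1) / 2 : Nat) : Int) := by
    rw [show ((k : Int) + 1) = ((k + 1 : Nat) : Int) by push_cast; ring,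
      show (2 : Int) = ((2 : Nat) : Int) by norm_num, PySem.Int.floordiv_natCast]
  have hm2 : PySem.Int.mod ((k : Int) + 1) 2 = (((k + 1) % 2 : Nat) : Int) := by
    rw [show ((k : Int) + 1) = ((k + 1 : Nat) : Int) by push_cast; ring,
      show (2 : Int) = ((2 : Nat) : Int) by norm_num, PySem.Int.mod_natCast]
  simp only [hh, hm2]
  have tB : ((((k + 1) / 2 : Nat) : Int) - 0).toNat = (k + 1) / 2 := by omega
  rw [PySem.List.pyRange_one 0 (((k + 1) / 2 : Nat) : Int), tB]
  simp only [List.foldl_map]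
  have hB := PySem.List.foldl_congr_mem (List.range ((k + 1) / 2))
    (fun (x : Int) (y : Nat) => x + PySem.List.pyGetD memB (0 + (y : Int)) 0 *
      PySem.List.pyGetD memB ((k : Int) + 1 - 1 - (0 + (y : Int))) 0)
    (fun (x : Int) (y : Nat) => x + PySem.List.pyGetD memB ((y : Int)) 0 *
      PySem.List.pyGetD memB ((k : Int) - (y : Int)) 0)
    0 ?_
  · rw [hB]
    simp only [foldl_add_sum, zero_add]
    rw [sym_sum (fun j => PySem.List.pyGetD memB ((j : Nat) : Int) 0 *
      PySem.List.pyGetD memB ((k : Int) - ((j : Nat) : Int)) 0) k hsym]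
    by_cases hodd : (k + 1) % 2 = 1
    · have hmid : (k : Int) - (((k + 1) / 2 : Nat) : Int) = (((k + 1) / 2 : Nat) : Int) := by
        omega
      rw [if_pos (by rw [hodd]; norm_num), if_pos hodd]
      rw [hmid]
    · have hz : (k + 1) % 2 = 0 := by omega
      rw [if_neg (by rw [hz]; norm_num), if_neg hodd]
      ring
  · intro a j hj
    have e1 : (0 : Int) + (j : Int) = (j : Int) := by ring
    have e2 : (k : Int) + 1 - 1 - (0 + (j : Int)) = (k : Int) - (j : Int) := by ring
    beta_reduce
    rw [e2, e1]

-- A's inner loop equals factorial · B's inner loop (indices only touch the shared prefix).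
theorem innerA_eq (memB zs : List Int) (k : Nat) (hlen : memB.length = k + 1) :
    innerA (memB ++ zs) ((k : Int) + 1) = factorial ((k : Int) + 1) * innerB memB ((k : Int) + 1) := by
  unfold innerA
  have tA : ((k : Int) + 1 + 1 - 1).toNat = k + 1 := by omega
  rw [PySem.List.pyRange_one 1 ((k : Int) + 1 + 1), tA]
  simp only [List.foldl_map]
  have hA := PySem.List.foldl_congr_mem (List.range (k + 1))
    (fun (x : Int) (y : Nat) => x + PySem.List.pyGetD (memB ++ zs) (1 + (y : Int) - 1) 0 *
      PySem.List.pyGetD (memB ++ zs) ((k : Int) + 1 - (1 + (y : Int))) 0 * factorial ((k : Int) + 1))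
    (fun (x : Int) (y : Nat) => x + PySem.List.pyGetD memB ((y : Int)) 0 *
      PySem.List.pyGetD memB ((k : Int) - (y : Int)) 0 * factorial ((k : Int) + 1))
    0 ?_
  · rw [hA, innerB_eq memB k]
    simp only [foldl_add_sum, zero_add]
    rw [← Finset.sum_mul, mul_comm]
  · intro a j hj
    have hj' : j < k + 1 := List.mem_range.mp hj
    have e1 : (1 : Int) + (j : Int) - 1 = (j : Int) := by ring
    have e2 : (k : Int) + 1 - (1 + (j : Int)) = (k : Int) - (j : Int) := by ring
    have e3 : (k : Int) - (j : Int) = ((k - j : Nat) : Int) := by omega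
    beta_reduce
    rw [e1, e2, pyGetD_append_left_nat memB zs j (by omega), e3,
      pyGetD_append_left_nat memB zs (k - j) (by omega), ← e3]

-- setting the first cell behind the shared prefix
theorem set_append_len (xs ys : List Int) (y v : Int) :
    (xs ++ y :: ys).set xs.length v = xs ++ v :: ys := by
  simp

-- main loop invariant: after processing 2..k, A's memory is B's memory padded with zeros,
-- B's memory has length k+1 and B's running factorial is k!.
theorem loop_inv (n : Nat) : ∀ k : Nat, 1 ≤ k → k ≤ n →
    ((PySem.List.pyRange 2 ((k : Int) + 1) 1).foldl stepA ([1, 1] ++ List.replicate (n - 1) 0)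
        = ((PySem.List.pyRange 2 ((k : Int) + 1) 1).foldl stepB ([1, 1], 1)).1
          ++ List.replicate (n - k) (0 : Int))
    ∧ ((PySem.List.pyRange 2 ((k : Int) + 1) 1).foldl stepB ([1, 1], 1)).1.length = k + 1
    ∧ ((PySem.List.pyRange 2 ((k : Int) + 1) 1).foldl stepB ([1, 1], 1)).2 = (k.factorial : Int) := by
  intro k
  induction k with
  | zero => intro h; exact absurd h (by omega)
  | succ k ih =>
    intro _ hkn
    by_cases hk : k = 0
    · subst hk
      have h2 : (((0 + 1 : Nat)) : Int) + 1 = 2 := by norm_num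
      rw [h2, PySem.List.pyRange_one_eq_nil (le_refl 2)]
      simp [Nat.factorial]
    · have hk1 : 1 ≤ k := by omega
      obtain ⟨hmem, hlen, hfact⟩ := ih hk1 (by omega)
      have hcast : (((k + 1 : Nat)) : Int) + 1 = ((k : Int) + 1) + 1 := by push_cast; ring
      rw [hcast, PySem.List.pyRange_one_succ_right (by omega : (2 : Int) ≤ (k : Int) + 1)]
      simp only [List.foldl_append, List.foldl_cons, List.foldl_nil]
      set B := (PySem.List.pyRange 2 ((k : Int) + 1) 1).foldl stepB ([1, 1], 1) with hB
      have hF : factorial ((k : Int) + 1) = ((k + 1).factorial : Int) := by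
        have := factorial_eq (k + 1) (by omega)
        rwa [show (((k + 1 : Nat)) : Int) = (k : Int) + 1 by push_cast; ring] at this
      have hfact' : B.2 * ((k : Int) + 1) = ((k + 1).factorial : Int) := by
        rw [hfact, Nat.factorial_succ]; push_cast; ring
      have hvals : innerA (B.1 ++ List.replicate (n - k) 0) ((k : Int) + 1)
          = B.2 * ((k : Int) + 1) * innerB B.1 ((k : Int) + 1) := by
        rw [innerA_eq B.1 _ k hlen, hF, ← hfact']
      refine ⟨?_, ?_, ?_⟩
      · rw [hmem]
        unfold stepA stepB
        rw [hvals]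
        obtain ⟨t, ht⟩ : ∃ t, n - k = t + 1 := ⟨n - k - 1, by omega⟩
        have htt : n - (k + 1) = t := by omega
        rw [ht, htt, List.replicate_succ, PySem.List.pySetD_of_nonneg _ _ (by omega),
          show (((k : Int) + 1)).toNat = B.1.length by omega, set_append_len]
        simp
      · unfold stepB; simp [hlen]
      · unfold stepB; exact hfact'

-- ===== VERDICT (by name: the statement is the Claim_ definition above) =====
theorem numOfBT_spec : Claim_equal_numOfBT := by
  intro N _ hPre
  show numOfBT N = numOfBT_alt N
  have hPre' : 1 ≤ N := hPre
  set n := N.toNat with hn'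
  have hN : (n : Int) = N := by omega
  have hn : 1 ≤ n := by omega
  rw [numOfBT_eq, numOfBT_alt_eq, ← hN]
  have h1 : ((n : Int) + 1).toNat = n + 1 := by omega
  have hinit : PySem.List.pySetD (PySem.List.pySetD (List.replicate (n + 1) (0 : Int)) 0 1) 1 1
      = ([1, 1] : List Int) ++ List.replicate (n - 1) (0 : Int) := by
    rw [PySem.List.pySetD_of_nonneg _ _ (by norm_num), PySem.List.pySetD_of_nonneg _ _ (by norm_num)]
    obtain ⟨m, hm⟩ : ∃ m, n = m + 1 := ⟨n - 1, by omega⟩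
    rw [hm]
    norm_num [List.replicate_succ, List.set]
  rw [h1, hinit]
  obtain ⟨hmem, -, -⟩ := loop_inv n n hn le_rfl
  rw [hmem]
  simp
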